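-- pv_equiv track=rewrite | github.com/sola-da/Chameleon | src/testcases.py | split_combined_testcase
-- ===== SOURCE A (Python) =====
-- def split_combined_testcase(tc):
--     splitted = []
--     for itr in range(0, len(tc)):
--         if (tc[itr] == "dynamic" or tc[itr] == "static"):
--             start = itr
--             for end in range(itr+1, len(tc)):
--                 if (tc[end] == "dynamic" or tc[end] == "static"):
--                     splitted.append(tc[start:end])
--                     break;
--                 if (end == len(tc)-1):
--                     splitted.append(tc[start:end+1])
--                     break;
--     return splitted
-- ===== SOURCE B (Python) =====
-- def split_combined_testcase(tc):
--     splitted = []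
--     start = None
--     for i, x in enumerate(tc):
--         if x == "dynamic" or x == "static":
--             if start is not None:
--                 splitted.append(tc[start:i])
--             start = i
--     if start is not None and start < len(tc) - 1:
--         splitted.append(tc[start:])
--     return splitted
-- ===== Notes on version B (the rewrite author's own statement) =====
-- stated objective: simpler
-- what changed: Replaces A's nested loops (for every marker, an inner rescan to the next marker or the end) by a single linear pass that keeps the index of the currently open segment and closes it at the next marker, with one guarded append for the trailing segment.
import Mathlib
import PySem

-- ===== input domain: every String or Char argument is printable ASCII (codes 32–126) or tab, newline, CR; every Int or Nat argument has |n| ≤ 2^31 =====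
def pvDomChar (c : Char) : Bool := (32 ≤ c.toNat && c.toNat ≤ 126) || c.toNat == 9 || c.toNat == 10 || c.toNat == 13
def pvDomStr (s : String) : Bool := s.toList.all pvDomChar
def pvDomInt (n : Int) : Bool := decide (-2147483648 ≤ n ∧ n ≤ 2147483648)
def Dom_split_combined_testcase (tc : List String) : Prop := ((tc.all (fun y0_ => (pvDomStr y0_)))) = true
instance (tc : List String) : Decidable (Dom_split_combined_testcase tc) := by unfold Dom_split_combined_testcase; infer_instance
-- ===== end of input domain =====

-- B replaces A's nested marker-rescanning loops by one linear pass that keeps the index of the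
-- currently open segment (objective: simpler, one pass; same O(n) cost, return value identical).

-- ===== PORT A =====
-- tc[e] == "dynamic" or tc[e] == "static"
def pvMarker (s : String) : Bool := s == "dynamic" || s == "static"

-- inner loop: for end in range(itr+1, len(tc)) with the two breaks
def pvInnerA (tc : List String) (start : Nat) (e : Nat) (acc : List (List String)) :
    List (List String) :=
  if e < tc.length then
    if pvMarker (tc.getD e "") then
      acc ++ [PySem.List.slice tc (some (start : Int)) (some (e : Int))]
    else if e = tc.length - 1 then
      acc ++ [PySem.List.slice tc (some (start : Int)) (some ((e : Int) + 1))]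
    else pvInnerA tc start (e + 1) acc
  else acc
termination_by tc.length - e

-- outer loop: for itr in range(0, len(tc))
def pvOuterA (tc : List String) (itr : Nat) (acc : List (List String)) : List (List String) :=
  if itr < tc.length then
    pvOuterA tc (itr + 1)
      (if pvMarker (tc.getD itr "") then pvInnerA tc itr (itr + 1) acc else acc)
  else acc
termination_by tc.length - itr

def split_combined_testcase (tc : List String) : List (List String) :=
  pvOuterA tc 0 []

-- ===== PORT B =====
-- for i, x in enumerate(tc): maintain (splitted, start)
def pvLoopB (tc : List String) (rest : List String) (i : Nat)
    (acc : List (List String)) (start : Option Nat) : List (List String) × Option Nat :=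
  match rest with
  | [] => (acc, start)
  | x :: xs =>
    if pvMarker x then
      match start with
      | none => pvLoopB tc xs (i + 1) acc (some i)
      | some s =>
          pvLoopB tc xs (i + 1)
            (acc ++ [PySem.List.slice tc (some (s : Int)) (some (i : Int))]) (some i)
    else pvLoopB tc xs (i + 1) acc start

-- trailing: if start is not None and start < len(tc) - 1: append tc[start:]
def pvFinB (tc : List String) (p : List (List String) × Option Nat) : List (List String) :=
  match p.2 with
  | some s =>
      if s < tc.length - 1 then p.1 ++ [PySem.List.slice tc (some (s : Int)) none] else p.1
  | none => p.1

def split_combined_testcase_alt (tc : List String) : List (List String) :=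
  pvFinB tc (pvLoopB tc tc 0 [] none)

-- ===== PRECONDITION & SPEC =====
def Spec_split_combined_testcase (tc : List String) (out : List (List String)) : Prop := out = split_combined_testcase_alt tc
instance (tc : List String) (out : List (List String)) : Decidable (Spec_split_combined_testcase tc out) := by unfold Spec_split_combined_testcase; infer_instance

-- ===== CLAIM (what is proved, stated in full; the proofs are below) =====
def Claim_equal_split_combined_testcase : Prop := ∀ (tc : List String), Dom_split_combined_testcase tc → Spec_split_combined_testcase tc (split_combined_testcase tc)

-- ===== LEMMAS AND PROOFS =====

theorem pvInnerA_acc_aux (tc : List String) :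
    ∀ (k start e : Nat) (acc : List (List String)), tc.length - e ≤ k →
      pvInnerA tc start e acc = acc ++ pvInnerA tc start e [] := by
  intro k
  induction k with
  | zero =>
    intro start e acc h
    have h' : ¬ e < tc.length := by omega
    conv_lhs => rw [pvInnerA]
    conv_rhs => rw [pvInnerA]
    simp [h']
  | succ k ih =>
    intro start e acc h
    conv_lhs => rw [pvInnerA]
    conv_rhs => rw [pvInnerA]
    split_ifs with h1 h2 h3
    · rfl
    · rfl
    · exact ih start (e + 1) acc (by omega)
    · simp

theorem pvInnerA_acc (tc : List String) (start e : Nat) (acc : List (List String)) :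
    pvInnerA tc start e acc = acc ++ pvInnerA tc start e [] :=
  pvInnerA_acc_aux tc (tc.length - e) start e acc le_rfl

theorem pvOuterA_acc_aux (tc : List String) :
    ∀ (k itr : Nat) (acc : List (List String)), tc.length - itr ≤ k →
      pvOuterA tc itr acc = acc ++ pvOuterA tc itr [] := by
  intro k
  induction k with
  | zero =>
    intro itr acc h
    have h' : ¬ itr < tc.length := by omega
    conv_lhs => rw [pvOuterA]
    conv_rhs => rw [pvOuterA]
    simp [h']
  | succ k ih =>
    intro itr acc h
    by_cases h' : itr < tc.length
    · conv_lhs => rw [pvOuterA]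
      conv_rhs => rw [pvOuterA]
      simp only [if_pos h']
      by_cases hm : pvMarker (tc.getD itr "") = true
      · simp only [if_pos hm]
        rw [ih (itr + 1) (pvInnerA tc itr (itr + 1) acc) (by omega),
            ih (itr + 1) (pvInnerA tc itr (itr + 1) []) (by omega),
            pvInnerA_acc tc itr (itr + 1) acc]
        simp
      · simp only [if_neg hm]
        rw [ih (itr + 1) acc (by omega)]
    · conv_lhs => rw [pvOuterA]
      conv_rhs => rw [pvOuterA]
      simp [h']

theorem pvOuterA_acc (tc : List String) (itr : Nat) (acc : List (List String)) :
    pvOuterA tc itr acc = acc ++ pvOuterA tc itr [] :=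
  pvOuterA_acc_aux tc (tc.length - itr) itr acc le_rfl

theorem pvLoopB_acc (tc : List String) :
    ∀ (rest : List String) (i : Nat) (acc : List (List String)) (st : Option Nat),
      pvLoopB tc rest i acc st =
        (acc ++ (pvLoopB tc rest i [] st).1, (pvLoopB tc rest i [] st).2) := by
  intro rest
  induction rest with
  | nil => intro i acc st; simp [pvLoopB]
  | cons x xs ih =>
    intro i acc st
    by_cases hm : pvMarker x = true
    · cases st with
      | none =>
        simp only [pvLoopB, if_pos hm]
        exact ih (i + 1) acc (some i)
      | some s =>
        simp only [pvLoopB, if_pos hm]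
        rw [ih (i + 1) (acc ++ [PySem.List.slice tc (some (s : Int)) (some (i : Int))]) (some i),
            ih (i + 1) ([] ++ [PySem.List.slice tc (some (s : Int)) (some (i : Int))]) (some i)]
        simp
    · simp only [pvLoopB, if_neg hm]
      exact ih (i + 1) acc st

theorem pvFinB_append (tc : List String) (a l : List (List String)) (st : Option Nat) :
    pvFinB tc (a ++ l, st) = a ++ pvFinB tc (l, st) := by
  cases st with
  | none => simp [pvFinB]
  | some s => by_cases h : s < tc.length - 1 <;> simp [pvFinB, h]

theorem pvDrop_head : ∀ (tc : List String) (i : Nat) (x : String) (xs : List String),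
    tc.drop i = x :: xs → tc.getD i "" = x := by
  intro tc
  induction tc with
  | nil => intro i x xs h; simp at h
  | cons y ys ih =>
    intro i x xs h
    cases i with
    | zero =>
      simp only [List.drop_zero] at h
      cases h
      rfl
    | succ n =>
      simp only [List.drop_succ_cons] at h
      simpa using ih n x xs h

theorem pvDrop_tail (tc xs : List String) (x : String) (i : Nat) (h : tc.drop i = x :: xs) :
    tc.drop (i + 1) = xs := by
  have : (tc.drop i).drop 1 = tc.drop (i + 1) := by
    rw [List.drop_drop]
  rw [← this, h]
  simp

theorem pvDrop_lt (tc xs : List String) (x : String) (i : Nat) (h : tc.drop i = x :: xs) :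
    i < tc.length := by
  have := List.length_drop (l := tc) (i := i)
  rw [h] at this
  simp at this
  omega

theorem pvSlice_tail (tc : List String) (s : Nat) (h : s ≤ tc.length) :
    PySem.List.slice tc (some (s : Int)) (some ((tc.length : Nat) : Int)) =
      PySem.List.slice tc (some (s : Int)) none := by
  rw [PySem.List.slice_toNat _ (by positivity) (by positivity),
      PySem.List.slice_some_none, PySem.List.clampIdx_natCast]
  have hmin : min s tc.length = s := Nat.min_eq_left h
  rw [hmin]
  simp only [Int.toNat_natCast]
  exact List.take_of_length_le (by simp)

theorem pvKeyL (tc : List String) :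
    ∀ (rest : List String) (i s : Nat), tc.drop i = rest → i ≤ tc.length → s < i →
      (i = tc.length → s = tc.length - 1) →
      pvInnerA tc s i [] ++ pvOuterA tc i [] =
        pvFinB tc (pvLoopB tc rest i [] (some s)) := by
  intro rest
  induction rest with
  | nil =>
    intro i s h hi hs hlast
    have hlen : tc.length ≤ i := by
      have := List.length_drop (l := tc) (i := i); rw [h] at this; simp at this; omega
    have hieq : i = tc.length := by omega
    have hseq : s = tc.length - 1 := hlast hieq
    have hnlt : ¬ i < tc.length := by omega
    rw [pvInnerA, pvOuterA]
    simp only [if_neg hnlt, List.nil_append, pvLoopB, pvFinB]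
    have : ¬ s < tc.length - 1 := by omega
    simp [this]
  | cons x xs ih =>
    intro i s h hi hs hlast
    have hlt : i < tc.length := pvDrop_lt tc xs x i h
    have hx : tc.getD i "" = x := pvDrop_head tc i x xs h
    have hxs : tc.drop (i + 1) = xs := pvDrop_tail tc xs x i h
    by_cases hm : pvMarker x
    · -- marker at i: A appends tc[s:i] via the inner loop, B appends it in the pass
      rw [pvInnerA]
      simp only [if_pos hlt, hx, if_pos hm, List.nil_append]
      rw [pvOuterA]
      simp only [if_pos hlt, hx, if_pos hm]
      rw [pvOuterA_acc tc (i+1)]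
      rw [pvLoopB]
      simp only [if_pos hm]
      rw [pvLoopB_acc tc xs (i+1) _ (some i)]
      rw [pvFinB_append]
      rw [← ih (i+1) i hxs (by omega) (by omega) (by omega)]
      simp
    · by_cases hl : i = tc.length - 1
      · -- last position, not a marker: A appends tc[s:len], B closes with tc[s:]
        have hxs0 : xs = [] := by
          have := pvDrop_tail tc xs x i h
          have h2 : tc.length ≤ i + 1 := by omega
          rw [List.drop_of_length_le h2] at this
          exact this.symm
        rw [pvInnerA]
        simp only [if_pos hlt, hx, if_neg hm, if_pos hl, List.nil_append]
        rw [pvOuterA]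
        simp only [if_pos hlt, hx, if_neg hm]
        rw [pvOuterA]
        have : ¬ i + 1 < tc.length := by omega
        simp only [if_neg this]
        rw [pvLoopB]
        simp only [if_neg hm, hxs0, pvLoopB, pvFinB]
        have hslt : s < tc.length - 1 := by omega
        simp only [if_pos hslt, List.nil_append]
        have hcast : ((i : Int) + 1) = (((i + 1 : Nat)) : Int) := by push_cast; ring
        have hilen : i + 1 = tc.length := by omega
        rw [hcast, hilen, pvSlice_tail tc s (by omega)]
        simp
      · -- interior non-marker: both sides just move on
        rw [pvInnerA]
        simp only [if_pos hlt, hx, if_neg hm, if_neg hl]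
        rw [pvOuterA]
        simp only [if_pos hlt, hx, if_neg hm]
        rw [pvLoopB]
        simp only [if_neg hm]
        exact ih (i+1) s hxs (by omega) (by omega) (by omega)

theorem pvKeyM (tc : List String) :
    ∀ (rest : List String) (i : Nat), tc.drop i = rest → i ≤ tc.length →
      pvOuterA tc i [] = pvFinB tc (pvLoopB tc rest i [] none) := by
  intro rest
  induction rest with
  | nil =>
    intro i h hi
    have hnlt : ¬ i < tc.length := by
      have := List.length_drop (l := tc) (i := i); rw [h] at this; simp at this; omega
    rw [pvOuterA]
    simp [hnlt, pvLoopB, pvFinB]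
  | cons x xs ih =>
    intro i h hi
    have hlt : i < tc.length := pvDrop_lt tc xs x i h
    have hx : tc.getD i "" = x := pvDrop_head tc i x xs h
    have hxs : tc.drop (i + 1) = xs := pvDrop_tail tc xs x i h
    by_cases hm : pvMarker x
    · rw [pvOuterA]
      simp only [if_pos hlt, hx, if_pos hm]
      rw [pvOuterA_acc tc (i+1)]
      rw [pvLoopB]
      simp only [if_pos hm]
      exact pvKeyL tc xs (i+1) i hxs (by omega) (by omega) (by omega)
    · rw [pvOuterA]
      simp only [if_pos hlt, hx, if_neg hm]
      rw [pvLoopB]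
      simp only [if_neg hm]
      exact ih (i+1) hxs (by omega)

-- ===== VERDICT (by name: the statement is the Claim_ definition above) =====
theorem split_combined_testcase_spec : Claim_equal_split_combined_testcase := by
  intro tc _
  unfold Spec_split_combined_testcase split_combined_testcase split_combined_testcase_alt
  exact pvKeyM tc tc 0 (by simp) (by omega)
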